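-- pv_equiv track=rewrite | github.com/bfishbaum/euler | prob061.py | isPolygonalNumber
-- ===== SOURCE A (Python) =====
-- def polygonalNumber(ngon,index):
-- 	if(ngon < 3): return 0
-- 	else:
-- 		a = index * (index + 1) // 2
-- 		b = (ngon-3) * index * (index-1) // 2
-- 		return a + b
--
-- def isPolygonalNumber(x):
-- 	for gon in range(3,9):
-- 		counter = 0
-- 		number = 1
-- 		while(number < x):
-- 			counter += 1
-- 			number = polygonalNumber(counter,gon)
-- 			if(number == x):
-- 				return (counter,gon)
-- 	return (0,0)
-- ===== SOURCE B (Python) =====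
-- def isPolygonalNumber(x):
--     # A (with its swapped-argument call) hits, for each gon g, the arithmetic
--     # progression first_g, first_g+step_g, ... ; invert that in O(1) per g.
--     for g in range(3, 9):
--         step = g * (g - 1) // 2
--         first = g * (g + 1) // 2
--         if x >= first and (x - first) % step == 0:
--             return ((x - first) // step + 3, g)
--     return (0, 0)
-- ===== Notes on version B (the rewrite author's own statement) =====
-- stated objective: faster
-- what changed: A searches each of the six progressions by incrementing a counter until the running polygonal value reaches x; B inverts the closed form of each progression, replacing the linear scan with one divisibility test and an exact division per gon type.
import Mathlib
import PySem

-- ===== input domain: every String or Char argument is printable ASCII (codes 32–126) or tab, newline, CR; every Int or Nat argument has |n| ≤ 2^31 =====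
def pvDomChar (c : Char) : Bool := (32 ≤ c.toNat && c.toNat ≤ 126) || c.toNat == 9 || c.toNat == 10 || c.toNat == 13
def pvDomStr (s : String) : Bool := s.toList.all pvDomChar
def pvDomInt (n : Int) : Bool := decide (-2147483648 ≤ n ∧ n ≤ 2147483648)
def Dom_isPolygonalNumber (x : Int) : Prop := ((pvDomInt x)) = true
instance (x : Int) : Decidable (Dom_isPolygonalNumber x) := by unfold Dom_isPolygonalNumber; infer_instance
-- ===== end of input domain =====

-- B replaces A's linear trial search per gon by an O(1) closed-form divisibility test
-- (inverting the arithmetic progression A's loop enumerates); return value only.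

-- ===== PORT A =====
-- polygonalNumber(ngon, index)
def polyN (ngon index : Int) : Int :=
  if ngon < 3 then 0
  else
    let a := PySem.Int.floordiv (index * (index + 1)) 2
    let b := PySem.Int.floordiv ((ngon - 3) * index * (index - 1)) 2
    a + b

-- the inner `while number < x` loop; fuel only makes it total, it is never exhausted
def loopA (x gon counter number : Int) : Nat → Option Int
  | 0 => none
  | f + 1 =>
    if number < x then
      let c := counter + 1
      let n := polyN c gon
      if n = x then some c else loopA x gon c n f
    else none

def tryGons (x : Int) : List Int → List Int
  | [] => [0, 0]
  | g :: rest =>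
    match loopA x g 0 1 (x.toNat + 10) with
    | some c => [c, g]
    | none => tryGons x rest

def isPolygonalNumber (x : Int) : List Int :=
  tryGons x (PySem.List.pyRange 3 9 1)

-- ===== PORT B =====
def altGo (x : Int) : List Int → List Int
  | [] => [0, 0]
  | g :: rest =>
    let step := PySem.Int.floordiv (g * (g - 1)) 2
    let first := PySem.Int.floordiv (g * (g + 1)) 2
    if first ≤ x ∧ PySem.Int.mod (x - first) step = 0 then
      [PySem.Int.floordiv (x - first) step + 3, g]
    else altGo x rest

def isPolygonalNumber_alt (x : Int) : List Int :=
  altGo x (PySem.List.pyRange 3 9 1)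

-- ===== PRECONDITION & SPEC =====
def Spec_isPolygonalNumber (x : Int) (out : List Int) : Prop := out = isPolygonalNumber_alt x
instance (x : Int) (out : List Int) : Decidable (Spec_isPolygonalNumber x out) := by unfold Spec_isPolygonalNumber; infer_instance

-- ===== CLAIM (what is proved, stated in full; the proofs are below) =====
def Claim_equal_isPolygonalNumber : Prop := ∀ (x : Int), Dom_isPolygonalNumber x → Spec_isPolygonalNumber x (isPolygonalNumber x)

-- ===== LEMMAS AND PROOFS =====

-- For gon = g with 3 ≤ g ≤ 8, A's `number` after setting counter = c ≥ 3 is s*c + off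
-- (s = g(g-1)/2, off = g(g+1)/2 - 3s).  Characterise the while loop from such a state.
theorem loopA_char (x g s off : Int) (hs : 0 < s)
    (hP : ∀ c : Int, 3 ≤ c → polyN c g = s * c + off) :
    ∀ (f : Nat) (c : Int), 2 ≤ c → x ≤ s * c + off + s * f →
    loopA x g c (s * c + off) f =
      if x ≤ s * c + off then none
      else if s ∣ (x - off) then some ((x - off) / s) else none := by
  intro f
  induction f with
  | zero =>
    intro c hc hb
    have hx : x ≤ s * c + off := by simpa using hb
    rw [if_pos hx]
    rfl
  | succ f ih =>
    intro c hc hb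
    by_cases hlt : s * c + off < x
    · have h3 : (3 : Int) ≤ c + 1 := by omega
      have hexp : s * (c + 1) = s * c + s := by ring
      simp only [loopA, if_pos hlt, hP (c + 1) h3]
      by_cases heq : s * (c + 1) + off = x
      · rw [if_pos heq, if_neg (by omega : ¬ x ≤ s * c + off)]
        have hdvd : s ∣ (x - off) := ⟨c + 1, by omega⟩
        rw [if_pos hdvd]
        have : x - off = s * (c + 1) := by omega
        rw [this, Int.mul_ediv_cancel_left _ (by omega : s ≠ 0)]
      · rw [if_neg heq]
        have hb' : x ≤ s * (c + 1) + off + s * f := by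
          have : s * ((f : Int) + 1) = s * f + s := by ring
          push_cast at hb
          omega
        rw [ih (c + 1) (by omega) hb']
        rw [if_neg (by omega : ¬ x ≤ s * c + off)]
        by_cases hle2 : x ≤ s * (c + 1) + off
        · rw [if_pos hle2]
          have hnd : ¬ s ∣ (x - off) := by
            rintro ⟨k, hk⟩
            have h1 : s * c < s * k := by omega
            have h2 : s * k < s * (c + 1) := by omega
            have hck : c < k := lt_of_mul_lt_mul_left h1 (le_of_lt hs)
            have hkc : k < c + 1 := lt_of_mul_lt_mul_left h2 (le_of_lt hs)
            omega
          rw [if_neg hnd]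
        · rw [if_neg hle2]
    · simp only [loopA, if_neg hlt]
      rw [if_pos (by omega : x ≤ s * c + off)]

theorem loopA_succ (x g c n : Int) (f : Nat) :
    loopA x g c n (f + 1) =
      if n < x then
        (if polyN (c + 1) g = x then some (c + 1) else loopA x g (c + 1) (polyN (c + 1) g) f)
      else none := rfl

theorem loopA_top (x g s off : Int) (hs : 0 < s)
    (hP : ∀ c : Int, 3 ≤ c → polyN c g = s * c + off)
    (hfirst : 1 < s * 3 + off) :
    loopA x g 0 1 (x.toNat + 10) =
      if s * 3 + off ≤ x ∧ s ∣ (x - off) then some ((x - off) / s) else none := by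
  have e : x.toNat + 10 = ((x.toNat + 7) + 1 + 1) + 1 := by omega
  rw [e, loopA_succ]
  by_cases hx : 1 < x
  · rw [if_pos hx]
    simp only [show (0 : Int) + 1 = 1 from by norm_num]
    have h1 : polyN 1 g = 0 := by norm_num [polyN]
    have h2 : polyN 2 g = 0 := by norm_num [polyN]
    rw [h1, if_neg (by omega : ¬ (0 : Int) = x), loopA_succ, if_pos (by omega : (0:Int) < x)]
    simp only [show (1 : Int) + 1 = 2 from by norm_num]
    rw [h2, if_neg (by omega : ¬ (0 : Int) = x), loopA_succ, if_pos (by omega : (0:Int) < x)]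
    simp only [show (2 : Int) + 1 = 3 from by norm_num]
    rw [hP 3 le_rfl]
    by_cases heq : s * 3 + off = x
    · rw [if_pos heq]
      have hdvd : s ∣ (x - off) := ⟨3, by omega⟩
      rw [if_pos ⟨le_of_eq heq, hdvd⟩]
      have hxo : x - off = s * 3 := by omega
      rw [hxo, Int.mul_ediv_cancel_left _ (by omega : s ≠ 0)]
    · rw [if_neg heq]
      have hb : x ≤ s * 3 + off + s * (x.toNat + 7) := by
        have h7 : (x.toNat : Int) + 7 ≤ s * ((x.toNat : Int) + 7) :=
          le_mul_of_one_le_left (by positivity) (by omega)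
        have hxt : x ≤ (x.toNat : Int) := Int.self_le_toNat x
        have : s * ((x.toNat : Int) + 7) = s * ((x.toNat : Int)) + s * 7 := by ring
        nlinarith
      rw [loopA_char x g s off hs hP (x.toNat + 7) 3 (by omega) hb]
      by_cases hle : x ≤ s * 3 + off
      · rw [if_pos hle, if_neg (by omega : ¬ (s * 3 + off ≤ x ∧ s ∣ (x - off)))]
      · rw [if_neg hle]
        by_cases hdvd : s ∣ (x - off)
        · rw [if_pos hdvd, if_pos ⟨by omega, hdvd⟩]
        · rw [if_neg hdvd, if_neg (by rintro ⟨-, h⟩; exact hdvd h)]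
  · rw [if_neg (by omega : ¬ (1 : Int) < x)]
    rw [if_neg (by rintro ⟨h, -⟩; omega : ¬ (s * 3 + off ≤ x ∧ s ∣ (x - off)))]

-- one gon of the outer loop: A's match on the loop result equals B's closed-form branch
theorem branch_eq (x g s off : Int) (hs : 0 < s)
    (hloop : loopA x g 0 1 (x.toNat + 10) =
      if s * 3 + off ≤ x ∧ s ∣ (x - off) then some ((x - off) / s) else none)
    (hstep : PySem.Int.floordiv (g * (g - 1)) 2 = s)
    (hfirst : PySem.Int.floordiv (g * (g + 1)) 2 = s * 3 + off)
    (k : List Int) :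
    (match loopA x g 0 1 (x.toNat + 10) with
      | some c => [c, g]
      | none => k) =
    (if PySem.Int.floordiv (g * (g + 1)) 2 ≤ x ∧
        PySem.Int.mod (x - PySem.Int.floordiv (g * (g + 1)) 2) (PySem.Int.floordiv (g * (g - 1)) 2) = 0
     then [PySem.Int.floordiv (x - PySem.Int.floordiv (g * (g + 1)) 2) (PySem.Int.floordiv (g * (g - 1)) 2) + 3, g]
     else k) := by
  rw [hloop, hstep, hfirst]
  by_cases hle : s * 3 + off ≤ x
  · by_cases hdvd : s ∣ (x - off)
    · obtain ⟨m, hm⟩ := hdvd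
      have hq : (x - off) / s = m := by
        rw [hm, Int.mul_ediv_cancel_left _ (by omega : s ≠ 0)]
      have hm3 : x - (s * 3 + off) = s * (m - 3) := by
        have : s * (m - 3) = s * m - s * 3 := by ring
        omega
      have hmod : PySem.Int.mod (x - (s * 3 + off)) s = 0 :=
        (PySem.Int.mod_eq_zero_iff_dvd _ _).mpr ⟨m - 3, hm3⟩
      have hdiv : PySem.Int.floordiv (x - (s * 3 + off)) s = m - 3 := by
        rw [PySem.Int.floordiv_eq_ediv_of_pos hs, hm3,
          Int.mul_ediv_cancel_left _ (by omega : s ≠ 0)]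
      rw [if_pos ⟨hle, ⟨m, hm⟩⟩, if_pos ⟨hle, hmod⟩, hq, hdiv]
      norm_num
    · have hnm : ¬ PySem.Int.mod (x - (s * 3 + off)) s = 0 := by
        intro h
        obtain ⟨m, hm⟩ := (PySem.Int.mod_eq_zero_iff_dvd _ _).mp h
        refine hdvd ⟨m + 3, ?_⟩
        have hx3 : s * (m + 3) = s * m + s * 3 := by ring
        omega
      rw [if_neg (by rintro ⟨-, h⟩; exact hdvd h), if_neg (by rintro ⟨-, h⟩; exact hnm h)]
  · rw [if_neg (by rintro ⟨h, -⟩; exact hle h), if_neg (by rintro ⟨h, -⟩; exact hle h)]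

theorem main_eq (x : Int) : isPolygonalNumber x = isPolygonalNumber_alt x := by
  have hr : PySem.List.pyRange 3 9 1 = [3, 4, 5, 6, 7, 8] := by decide
  have hP3 : ∀ c : Int, 3 ≤ c → polyN c 3 = 3 * c + (-3) := by
    intro c hc
    simp only [polyN, if_neg (show ¬ c < 3 by omega),
      PySem.Int.floordiv_eq_ediv_of_pos (show (0:Int) < 2 by norm_num)]
    omega
  have hP4 : ∀ c : Int, 3 ≤ c → polyN c 4 = 6 * c + (-8) := by
    intro c hc
    simp only [polyN, if_neg (show ¬ c < 3 by omega),
      PySem.Int.floordiv_eq_ediv_of_pos (show (0:Int) < 2 by norm_num)]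
    omega
  have hP5 : ∀ c : Int, 3 ≤ c → polyN c 5 = 10 * c + (-15) := by
    intro c hc
    simp only [polyN, if_neg (show ¬ c < 3 by omega),
      PySem.Int.floordiv_eq_ediv_of_pos (show (0:Int) < 2 by norm_num)]
    omega
  have hP6 : ∀ c : Int, 3 ≤ c → polyN c 6 = 15 * c + (-24) := by
    intro c hc
    simp only [polyN, if_neg (show ¬ c < 3 by omega),
      PySem.Int.floordiv_eq_ediv_of_pos (show (0:Int) < 2 by norm_num)]
    omega
  have hP7 : ∀ c : Int, 3 ≤ c → polyN c 7 = 21 * c + (-28 - 7) := by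
    intro c hc
    simp only [polyN, if_neg (show ¬ c < 3 by omega),
      PySem.Int.floordiv_eq_ediv_of_pos (show (0:Int) < 2 by norm_num)]
    omega
  have hP8 : ∀ c : Int, 3 ≤ c → polyN c 8 = 28 * c + (-48) := by
    intro c hc
    simp only [polyN, if_neg (show ¬ c < 3 by omega),
      PySem.Int.floordiv_eq_ediv_of_pos (show (0:Int) < 2 by norm_num)]
    omega
  unfold isPolygonalNumber isPolygonalNumber_alt
  rw [hr]
  simp only [tryGons, altGo]
  rw [branch_eq x 3 3 (-3) (by norm_num)
      (loopA_top x 3 3 (-3) (by norm_num) hP3 (by norm_num)) (by decide) (by decide),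
    branch_eq x 4 6 (-8) (by norm_num)
      (loopA_top x 4 6 (-8) (by norm_num) hP4 (by norm_num)) (by decide) (by decide),
    branch_eq x 5 10 (-15) (by norm_num)
      (loopA_top x 5 10 (-15) (by norm_num) hP5 (by norm_num)) (by decide) (by decide),
    branch_eq x 6 15 (-24) (by norm_num)
      (loopA_top x 6 15 (-24) (by norm_num) hP6 (by norm_num)) (by decide) (by decide),
    branch_eq x 7 21 (-35) (by norm_num)
      (loopA_top x 7 21 (-35) (by norm_num) (by simpa using hP7) (by norm_num)) (by decide) (by decide),
    branch_eq x 8 28 (-48) (by norm_num)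
      (loopA_top x 8 28 (-48) (by norm_num) hP8 (by norm_num)) (by decide) (by decide)]

-- ===== VERDICT (by name: the statement is the Claim_ definition above) =====
theorem isPolygonalNumber_spec : Claim_equal_isPolygonalNumber := by
  intro x _
  unfold Spec_isPolygonalNumber
  exact main_eq x
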